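-- pv_equiv track=rewrite | github.com/ChahelPaatur/Self-Modifying-Program-Synthesis-via-Online-Library-Evolution | common/ultra_ops.py | make_quadrant_symmetric
-- ===== SOURCE A (Python) =====
-- from typing import List, Dict, Tuple, Set
--
-- Grid = List[List[int]]
--
-- def make_quadrant_symmetric(grid: Grid) -> Grid:
--     """Replicate top-left quadrant to all quadrants"""
--     if not grid:
--         return grid
--
--     h, w = len(grid), len(grid[0])
--     mid_h, mid_w = h // 2, w // 2
--
--     result = [[0] * w for _ in range(h)]
--
--     # Top-left to all quadrants
--     for r in range(mid_h):
--         for c in range(mid_w):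
--             val = grid[r][c]
--             result[r][c] = val  # Top-left
--             result[r][w - 1 - c] = val  # Top-right
--             result[h - 1 - r][c] = val  # Bottom-left
--             result[h - 1 - r][w - 1 - c] = val  # Bottom-right
--
--     return result
-- ===== SOURCE B (Python) =====
-- from typing import List
--
-- Grid = List[List[int]]
--
-- def _src(mid: int, bound: int, i: int):
--     """Reflect full-grid index i into the top-left range [0, mid), or None for the middle band."""
--     if i < mid:
--         return i
--     if i >= bound - mid:
--         return bound - 1 - i
--     return None
--
-- def make_quadrant_symmetric(grid: Grid) -> Grid:
--     """Replicate top-left quadrant to all quadrants (gather formulation)."""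
--     if not grid:
--         return grid
--     h, w = len(grid), len(grid[0])
--     mid_h, mid_w = h // 2, w // 2
--     out = []
--     for r in range(h):
--         row = []
--         for c in range(w):
--             sr = _src(mid_h, h, r)
--             sc = _src(mid_w, w, c)
--             row.append(grid[sr][sc] if sr is not None and sc is not None else 0)
--         out.append(row)
--     return out
-- ===== Notes on version B (the rewrite author's own statement) =====
-- stated objective: alternative
-- what changed: B is a gather: it builds the result by mapping over every output cell and reflecting its indices back into the top-left quadrant, instead of A's scatter loop that writes each quadrant value to four mirror positions of a pre-zeroed grid.
import Mathlib
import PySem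

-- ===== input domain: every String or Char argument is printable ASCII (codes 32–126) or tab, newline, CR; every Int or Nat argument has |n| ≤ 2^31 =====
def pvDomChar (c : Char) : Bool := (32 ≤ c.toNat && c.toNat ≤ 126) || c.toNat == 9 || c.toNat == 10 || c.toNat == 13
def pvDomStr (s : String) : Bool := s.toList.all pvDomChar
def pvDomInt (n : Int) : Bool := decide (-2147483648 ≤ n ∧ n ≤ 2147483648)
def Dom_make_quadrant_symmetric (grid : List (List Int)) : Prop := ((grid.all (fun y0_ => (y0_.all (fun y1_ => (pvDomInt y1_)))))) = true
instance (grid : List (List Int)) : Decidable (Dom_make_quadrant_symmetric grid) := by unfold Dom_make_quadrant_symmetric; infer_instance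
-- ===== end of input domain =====

-- B replaces A's scatter (writing each top-left value to its four mirror cells of a zeroed
-- grid) by a gather that maps over every output cell and reflects its indices into the
-- top-left quadrant; same cost, different traversal (objective: alternative).

-- ===== PORT A =====
-- result[r][c] = v  (indices are always in range in A; List.set is exact there)
def pvSetAt (res : List (List Int)) (r c : Nat) (v : Int) : List (List Int) :=
  res.set r ((res.getD r []).set c v)

-- the body of A's inner loop: four mirrored writes of grid[r][c]
-- (grid[r][c] is read with default 0; Pre_ admits exactly the grids where Python's read is in range)
def pvStepA (grid : List (List Int)) (h w : Nat) (res : List (List Int)) (r c : Nat) : List (List Int) :=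
  let v := (grid.getD r []).getD c 0
  pvSetAt (pvSetAt (pvSetAt (pvSetAt res r c v) r (w - 1 - c) v) (h - 1 - r) c v) (h - 1 - r) (w - 1 - c) v

def make_quadrant_symmetric (grid : List (List Int)) : List (List Int) :=
  if grid.isEmpty then grid else
    let h := grid.length
    let w := (grid.headD []).length
    (List.range (h / 2)).foldl
      (fun res r => (List.range (w / 2)).foldl (fun res c => pvStepA grid h w res r c) res)
      (List.replicate h (List.replicate w 0))

-- ===== PORT B =====
-- reflect full-grid index i into [0, mid), or none for the middle band (B's _src helper)
def pvSrc (mid bound i : Nat) : Option Nat :=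
  if i < mid then some i else if bound - mid ≤ i then some (bound - 1 - i) else none

def make_quadrant_symmetric_alt (grid : List (List Int)) : List (List Int) :=
  if grid.isEmpty then grid else
    let h := grid.length
    let w := (grid.headD []).length
    (List.range h).map (fun r =>
      (List.range w).map (fun c =>
        match pvSrc (h / 2) h r, pvSrc (w / 2) w c with
        | some sr, some sc => (grid.getD sr []).getD sc 0
        | _, _ => 0))

-- ===== PRECONDITION & SPEC =====
-- Pre_ excludes exactly the ragged grids on which Python A raises IndexError
-- (a row in the top half shorter than w // 2); Python B raises there too.
def Pre_make_quadrant_symmetric (grid : List (List Int)) : Prop :=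
  ∀ row ∈ grid.take (grid.length / 2), (grid.headD []).length / 2 ≤ row.length

instance (grid : List (List Int)) : Decidable (Pre_make_quadrant_symmetric grid) := by
  unfold Pre_make_quadrant_symmetric; infer_instance

def pvWitness_make_quadrant_symmetric : List (List Int) := [[1, 2], [3, 4]]

def Spec_make_quadrant_symmetric (grid : List (List Int)) (out : List (List Int)) : Prop := out = make_quadrant_symmetric_alt grid
instance (grid : List (List Int)) (out : List (List Int)) : Decidable (Spec_make_quadrant_symmetric grid out) := by unfold Spec_make_quadrant_symmetric; infer_instance

-- ===== CLAIM (what is proved, stated in full; the proofs are below) =====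
def Claim_equal_make_quadrant_symmetric : Prop := ∀ (grid : List (List Int)), Dom_make_quadrant_symmetric grid → Pre_make_quadrant_symmetric grid → Spec_make_quadrant_symmetric grid (make_quadrant_symmetric grid)

-- ===== LEMMAS AND PROOFS =====

-- cell (i, j) of a matrix, with defaults (matches Python indexing on in-range cells)
def pvGet2 (res : List (List Int)) (i j : Nat) : Int := (res.getD i []).getD j 0

-- the matrix has h rows, each of length w
def pvShape (h w : Nat) (res : List (List Int)) : Prop :=
  res.length = h ∧ ∀ i, i < h → (res.getD i []).length = w

-- grid value read the way both ports read it
def pvGv (grid : List (List Int)) (a b : Nat) : Int := (grid.getD a []).getD b 0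

lemma pvGetD_eq_getElem (l : List (List Int)) (i : Nat) (h : i < l.length) :
    l.getD i [] = l[i] := by
  rw [List.getD_eq_getElem?_getD, List.getElem?_eq_getElem h]; rfl

lemma pvGetD_set_outer (l : List (List Int)) (r i : Nat) (x : List Int) :
    (l.set r x).getD i [] = if r = i ∧ r < l.length then x else l.getD i [] := by
  rw [List.getD_eq_getElem?_getD, List.getElem?_set]
  by_cases h1 : r = i
  · subst h1
    by_cases h2 : r < l.length
    · rw [if_pos rfl, if_pos h2, if_pos ⟨rfl, h2⟩, Option.getD_some]
    · rw [if_pos rfl, if_neg h2, if_neg (fun hh => h2 hh.2), List.getD_eq_getElem?_getD,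
          List.getElem?_eq_none (by omega)]
  · rw [if_neg h1, if_neg (fun hh => h1 hh.1), List.getD_eq_getElem?_getD]

lemma pvGetD_set_inner (l : List Int) (c j : Nat) (v : Int) :
    (l.set c v).getD j 0 = if c = j ∧ c < l.length then v else l.getD j 0 := by
  rw [List.getD_eq_getElem?_getD, List.getElem?_set]
  by_cases h1 : c = j
  · subst h1
    by_cases h2 : c < l.length
    · rw [if_pos rfl, if_pos h2, if_pos ⟨rfl, h2⟩, Option.getD_some]
    · rw [if_pos rfl, if_neg h2, if_neg (fun hh => h2 hh.2), List.getD_eq_getElem?_getD,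
          List.getElem?_eq_none (by omega)]
  · rw [if_neg h1, if_neg (fun hh => h1 hh.1), List.getD_eq_getElem?_getD]

lemma pvShape_pvSetAt (h w : Nat) (res : List (List Int)) (hs : pvShape h w res)
    (r c : Nat) (v : Int) : pvShape h w (pvSetAt res r c v) := by
  obtain ⟨hl, hrow⟩ := hs
  refine ⟨by simpa [pvSetAt] using hl, ?_⟩
  intro i hi
  rw [pvSetAt, pvGetD_set_outer]
  split_ifs with h1
  · obtain ⟨h1a, h1b⟩ := h1
    subst h1a
    rw [List.length_set]
    exact hrow _ hi
  · exact hrow i hi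

lemma pvGet2_pvSetAt (h w : Nat) (res : List (List Int)) (hs : pvShape h w res)
    (r c i j : Nat) (v : Int) (hrh : r < h) (hcw : c < w) (hi : i < h) (_hj : j < w) :
    pvGet2 (pvSetAt res r c v) i j = if i = r ∧ j = c then v else pvGet2 res i j := by
  obtain ⟨hl, hrow⟩ := hs
  have hrl : r < res.length := by omega
  rw [pvGet2, pvSetAt, pvGetD_set_outer]
  by_cases hri : r = i
  · rw [if_pos ⟨hri, hrl⟩, pvGetD_set_inner]
    have hcl : c < (res.getD r []).length := by rw [hrow r hrh]; exact hcw
    subst hri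
    rw [pvGet2]
    by_cases hjc : c = j
    · rw [if_pos ⟨hjc, hcl⟩, if_pos ⟨rfl, hjc.symm⟩]
    · rw [if_neg (fun hh => hjc hh.1), if_neg (fun hh => hjc hh.2.symm)]
  · rw [if_neg (fun hh => hri hh.1), pvGet2, if_neg (fun hh => hri hh.1.symm)]

lemma pvGet2_pvStepA (grid : List (List Int)) (h w : Nat) (res : List (List Int))
    (hs : pvShape h w res) (r c i j : Nat) (hrh : r < h) (hcw : c < w) (hi : i < h) (hj : j < w) :
    pvGet2 (pvStepA grid h w res r c) i j =
      if (i = r ∨ i = h - 1 - r) ∧ (j = c ∨ j = w - 1 - c) then pvGv grid r c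
      else pvGet2 res i j := by
  have h1 : h - 1 - r < h := by omega
  have w1 : w - 1 - c < w := by omega
  have s1 := pvShape_pvSetAt h w res hs r c (pvGv grid r c)
  have s2 := pvShape_pvSetAt h w _ s1 r (w - 1 - c) (pvGv grid r c)
  have s3 := pvShape_pvSetAt h w _ s2 (h - 1 - r) c (pvGv grid r c)
  have hstep : pvStepA grid h w res r c =
      pvSetAt (pvSetAt (pvSetAt (pvSetAt res r c (pvGv grid r c)) r (w - 1 - c) (pvGv grid r c))
        (h - 1 - r) c (pvGv grid r c)) (h - 1 - r) (w - 1 - c) (pvGv grid r c) := rfl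
  rw [hstep,
      pvGet2_pvSetAt h w _ s3 _ _ i j _ h1 w1 hi hj,
      pvGet2_pvSetAt h w _ s2 _ _ i j _ h1 hcw hi hj,
      pvGet2_pvSetAt h w _ s1 _ _ i j _ hrh w1 hi hj,
      pvGet2_pvSetAt h w _ hs _ _ i j _ hrh hcw hi hj]
  split_ifs <;> first | rfl | omega

lemma pvShape_pvStepA (grid : List (List Int)) (h w : Nat) (res : List (List Int))
    (hs : pvShape h w res) (r c : Nat) : pvShape h w (pvStepA grid h w res r c) := by
  have hstep : pvStepA grid h w res r c =
      pvSetAt (pvSetAt (pvSetAt (pvSetAt res r c (pvGv grid r c)) r (w - 1 - c) (pvGv grid r c))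
        (h - 1 - r) c (pvGv grid r c)) (h - 1 - r) (w - 1 - c) (pvGv grid r c) := rfl
  rw [hstep]
  exact pvShape_pvSetAt h w _ (pvShape_pvSetAt h w _ (pvShape_pvSetAt h w _
    (pvShape_pvSetAt h w _ hs _ _ _) _ _ _) _ _ _) _ _ _

lemma pvGet2_replicate (h w i j : Nat) (hi : i < h) :
    pvGet2 (List.replicate h (List.replicate w (0 : Int))) i j = 0 := by
  have houter : (List.replicate h (List.replicate w (0 : Int))).getD i [] = List.replicate w 0 := by
    rw [List.getD_eq_getElem?_getD, List.getElem?_replicate, if_pos hi, Option.getD_some]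
  rw [pvGet2, houter, List.getD_eq_getElem?_getD, List.getElem?_replicate]
  split_ifs <;> rfl

-- inner loop: after processing columns [0, k), rows r and h-1-r carry the mirrored values
lemma pvInner (grid : List (List Int)) (h w : Nat) (r : Nat) (hr : r < h / 2)
    (k : Nat) (hk : k ≤ w / 2) (res : List (List Int)) (hs : pvShape h w res) :
    pvShape h w ((List.range k).foldl (fun res c => pvStepA grid h w res r c) res) ∧
    ∀ i j, i < h → j < w →
      pvGet2 ((List.range k).foldl (fun res c => pvStepA grid h w res r c) res) i j =
        if (i = r ∨ i = h - 1 - r) ∧ (j < k ∨ w - 1 - j < k)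
        then pvGv grid r (if j < w / 2 then j else w - 1 - j)
        else pvGet2 res i j := by
  induction k with
  | zero =>
    refine ⟨by simpa using hs, ?_⟩
    intro i j hi hj
    simp
  | succ k ih =>
    have hk' : k ≤ w / 2 := by omega
    obtain ⟨ihS, ihG⟩ := ih hk'
    rw [List.range_succ, List.foldl_append, List.foldl_cons, List.foldl_nil]
    refine ⟨pvShape_pvStepA grid h w _ ihS r k, ?_⟩
    intro i j hi hj
    have hrh : r < h := by omega
    have hkw : k < w := by omega
    rw [pvGet2_pvStepA grid h w _ ihS r k i j hrh hkw hi hj, ihG i j hi hj]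
    have hval : ∀ b b' : Nat, b = b' → pvGv grid r b = pvGv grid r b' := by
      intro b b' hb; rw [hb]
    split_ifs <;> first | rfl | omega | (apply hval; omega)

-- outer loop: after processing rows [0, n), the reflected rows are filled, the rest is 0
lemma pvOuter (grid : List (List Int)) (h w : Nat) (n : Nat) (hn : n ≤ h / 2) :
    pvShape h w ((List.range n).foldl
        (fun res r => (List.range (w / 2)).foldl (fun res c => pvStepA grid h w res r c) res)
        (List.replicate h (List.replicate w 0))) ∧
    ∀ i j, i < h → j < w →
      pvGet2 ((List.range n).foldl
        (fun res r => (List.range (w / 2)).foldl (fun res c => pvStepA grid h w res r c) res)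
        (List.replicate h (List.replicate w 0))) i j =
        if (i < n ∨ h - 1 - i < n) ∧ (j < w / 2 ∨ w - 1 - j < w / 2)
        then pvGv grid (if i < h / 2 then i else h - 1 - i) (if j < w / 2 then j else w - 1 - j)
        else 0 := by
  induction n with
  | zero =>
    simp only [List.range_zero, List.foldl_nil]
    constructor
    · refine ⟨by simp, ?_⟩
      intro i hi
      have houter : (List.replicate h (List.replicate w (0 : Int))).getD i []
          = List.replicate w 0 := by
        rw [List.getD_eq_getElem?_getD, List.getElem?_replicate, if_pos hi, Option.getD_some]
      rw [houter, List.length_replicate]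
    · intro i j hi hj
      rw [pvGet2_replicate h w i j hi]
      split_ifs <;> first | rfl | omega
  | succ n ih =>
    have hn' : n ≤ h / 2 := by omega
    have hnh : n < h / 2 := by omega
    obtain ⟨ihS, ihG⟩ := ih hn'
    rw [List.range_succ, List.foldl_append, List.foldl_cons, List.foldl_nil]
    obtain ⟨innS, innG⟩ := pvInner grid h w n hnh (w / 2) le_rfl _ ihS
    refine ⟨innS, ?_⟩
    intro i j hi hj
    rw [innG i j hi hj, ihG i j hi hj]
    have hval : ∀ a a' b b' : Nat, a = a' → b = b' → pvGv grid a b = pvGv grid a' b' := by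
      intro a a' b b' ha hb; rw [ha, hb]
    split_ifs <;> first | rfl | omega | (apply hval <;> omega)

-- B's cell formula, written as nested ifs
lemma pvAltCell (grid : List (List Int)) (h w i j : Nat) (hi : i < h) (hj : j < w) :
    (match pvSrc (h / 2) h i, pvSrc (w / 2) w j with
      | some sr, some sc => (grid.getD sr []).getD sc 0
      | _, _ => (0 : Int)) =
    if (i < h / 2 ∨ h - 1 - i < h / 2) ∧ (j < w / 2 ∨ w - 1 - j < w / 2)
    then pvGv grid (if i < h / 2 then i else h - 1 - i) (if j < w / 2 then j else w - 1 - j)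
    else 0 := by
  simp only [pvSrc, pvGv]
  split_ifs <;> first | rfl | omega

-- ===== VERDICT (by name: the statement is the Claim_ definition above) =====
theorem make_quadrant_symmetric_spec : Claim_equal_make_quadrant_symmetric := by
  intro grid _ _
  unfold Spec_make_quadrant_symmetric
  by_cases hg : grid.isEmpty
  · simp [make_quadrant_symmetric, make_quadrant_symmetric_alt, hg]
  · have hne : grid ≠ [] := by simpa [List.isEmpty_iff] using hg
    simp only [make_quadrant_symmetric, make_quadrant_symmetric_alt, hg, Bool.false_eq_true,
      if_false]
    set h := grid.length with hh
    set w := (grid.headD []).length with hw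
    have hpos : 0 < h := by
      cases grid with
      | nil => exact absurd rfl hne
      | cons a t => simp [hh]
    obtain ⟨⟨hlen, hrows⟩, hG⟩ := pvOuter grid h w (h / 2) le_rfl
    apply List.ext_getElem
    · rw [hlen, List.length_map, List.length_range]
    · intro i hi1 hi2
      have hih : i < h := by rw [hlen] at hi1; exact hi1
      have hrw := hrows i hih
      rw [pvGetD_eq_getElem _ i (by omega)] at hrw
      rw [List.getElem_map, List.getElem_range]
      apply List.ext_getElem
      · rw [hrw, List.length_map, List.length_range]
      · intro j hj1 hj2
        have hjw : j < w := by rw [hrw] at hj1; exact hj1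
        rw [List.getElem_map, List.getElem_range, pvAltCell grid h w i j hih hjw]
        have hGij := hG i j hih hjw
        rw [pvGet2, pvGetD_eq_getElem _ i (by omega), List.getD_eq_getElem?_getD,
            List.getElem?_eq_getElem (by omega), Option.getD_some] at hGij
        exact hGij
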